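-- pv_equiv track=rewrite | github.com/alexandraback/datacollection | solutions_5695413893988352_0/Python/kosii/B.py | replace_qmark
-- ===== SOURCE A (Python) =====
-- def replace_qmark(a, b, prod):
--     i = 0
--     an = 0
--     bn = 0
--     for j in a:
--         if j == '?':
--             an = 10*an + prod[i]
--             i += 1
--         else:
--             an = 10*an + int(j)
--
--     for j in b:
--         if j == '?':
--             bn = 10*bn + prod[i]
--             i += 1
--         else:
--             bn = 10*bn + int(j)
--     return an, bn
-- ===== SOURCE B (Python) =====
-- def replace_qmark(a, b, prod):
--     it = iter(prod)
--     def number(s):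
--         digits = [next(it) if ch == '?' else int(ch) for ch in s]
--         return sum(d * 10 ** e for d, e in zip(digits, range(len(s) - 1, -1, -1)))
--     return number(a), number(b)
-- ===== Notes on version B (the rewrite author's own statement) =====
-- stated objective: idiomatic
-- what changed: Replaces Horner accumulation with a shared integer index into prod by a substitution pass over an iterator of prod followed by a positional sum of digit*10**exponent.
import Mathlib
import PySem

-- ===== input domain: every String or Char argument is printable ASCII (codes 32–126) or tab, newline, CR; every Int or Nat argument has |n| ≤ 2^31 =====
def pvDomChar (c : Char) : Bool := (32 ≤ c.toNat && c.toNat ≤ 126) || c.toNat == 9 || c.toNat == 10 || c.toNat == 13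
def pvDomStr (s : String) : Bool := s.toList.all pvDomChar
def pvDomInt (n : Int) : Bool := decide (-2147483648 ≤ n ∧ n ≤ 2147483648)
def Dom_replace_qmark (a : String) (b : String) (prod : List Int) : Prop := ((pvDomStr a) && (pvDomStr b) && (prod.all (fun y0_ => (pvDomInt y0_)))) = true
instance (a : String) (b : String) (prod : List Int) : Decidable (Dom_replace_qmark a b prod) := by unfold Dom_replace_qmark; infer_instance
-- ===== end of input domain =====

-- B substitutes prod values for '?' in one pass over an iterator and then sums digit*10^exponent
-- positionally, instead of A's Horner accumulation with a shared integer index into prod (idiomatic).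


-- ===== PORT A =====
-- one loop step of A: state (i, n); 'prod[i]' is PySem.List.pyGet? (in range under Pre_),
-- 'int(j)' for a single digit char is its code minus 48 (exact on digits; Pre_ admits only digits and '?')
def stepA (prod : List Int) : (Int × Int) → Char → (Int × Int)
  | (i, n), j =>
    if j = '?' then (i + 1, 10 * n + (PySem.List.pyGet? prod i).getD 0)
    else (i, 10 * n + ((j.toNat : Int) - 48))

def replace_qmark (a : String) (b : String) (prod : List Int) : Int × Int :=
  let s1 := a.toList.foldl (stepA prod) (0, 0)
  let s2 := b.toList.foldl (stepA prod) (s1.1, 0)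
  (s1.2, s2.2)

-- ===== PORT B =====
-- the substitution pass: 'next(it)' = take the head of the remaining prod list (Pre_ guarantees
-- it is never exhausted); returns the digit list and the remaining iterator
def altDigits (s : List Char) (it : List Int) : List Int × List Int :=
  match s with
  | [] => ([], it)
  | c :: cs =>
    if c = '?' then
      let r := altDigits cs it.tail
      (it.headD 0 :: r.1, r.2)
    else
      let r := altDigits cs it
      (((c.toNat : Int) - 48) :: r.1, r.2)

-- sum(d * 10 ** e for d, e in zip(digits, range(len(s)-1, -1, -1)))
def altNumber (digits : List Int) : Int :=
  ((digits.zip (List.range digits.length).reverse).map (fun de => de.1 * 10 ^ de.2)).sum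

def replace_qmark_alt (a : String) (b : String) (prod : List Int) : Int × Int :=
  let ra := altDigits a.toList prod
  let rb := altDigits b.toList ra.2
  (altNumber ra.1, altNumber rb.1)

-- ===== PRECONDITION & SPEC =====
-- Pre_ = exactly the inputs where A returns: every character is a decimal digit or '?'
-- (int(j) raises ValueError otherwise) and prod has enough entries for all '?' (else IndexError).
def Pre_replace_qmark (a : String) (b : String) (prod : List Int) : Prop :=
  (a.toList.all (fun c => c.isDigit || c == '?') && b.toList.all (fun c => c.isDigit || c == '?')) = true ∧
  a.toList.count '?' + b.toList.count '?' ≤ prod.length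

instance (a : String) (b : String) (prod : List Int) : Decidable (Pre_replace_qmark a b prod) := by
  unfold Pre_replace_qmark; infer_instance

def pvWitness_replace_qmark : String × String × List Int := ("1?", "?3", [5, 7])

def Spec_replace_qmark (a : String) (b : String) (prod : List Int) (out : Int × Int) : Prop := out = replace_qmark_alt a b prod
instance (a : String) (b : String) (prod : List Int) (out : Int × Int) : Decidable (Spec_replace_qmark a b prod out) := by unfold Spec_replace_qmark; infer_instance

-- ===== CLAIM (what is proved, stated in full; the proofs are below) =====
def Claim_equal_replace_qmark : Prop := ∀ (a : String) (b : String) (prod : List Int), Dom_replace_qmark a b prod → Pre_replace_qmark a b prod → Spec_replace_qmark a b prod (replace_qmark a b prod)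

-- ===== LEMMAS AND PROOFS =====

-- mathematical value of a digit list, recursively
def posVal : List Int → Int
  | [] => 0
  | d :: ds => d * 10 ^ ds.length + posVal ds

theorem altNumber_eq_posVal (ds : List Int) : altNumber ds = posVal ds := by
  induction ds with
  | nil => rfl
  | cons d ds ih =>
    simp only [altNumber, posVal, List.length_cons, List.range_succ, List.reverse_append,
      List.reverse_cons, List.reverse_nil, List.nil_append, List.cons_append, List.zip_cons_cons,
      List.map_cons, List.sum_cons]
    rw [← ih]; rfl

theorem altDigits_length (s : List Char) (it : List Int) :
    (altDigits s it).1.length = s.length := by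
  induction s generalizing it with
  | nil => rfl
  | cons c cs ih =>
    simp only [altDigits]
    split_ifs <;> simp [ih]

theorem altDigits_snd (s : List Char) (it : List Int) :
    (altDigits s it).2 = it.drop (s.count '?') := by
  induction s generalizing it with
  | nil => rfl
  | cons c cs ih =>
    simp only [altDigits, List.count_cons]
    by_cases h : c = '?'
    · simp [h, ih, List.drop_tail]
    · simp [h, ih]

-- the key invariant: A's Horner loop from state (k, n) over s equals
-- (k + #? in s, 10^|s| * n + positional value of the substituted digits, iterator = prod.drop k)
theorem foldl_stepA (prod : List Int) (s : List Char) :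
    ∀ (k : Nat) (n : Int), k + s.count '?' ≤ prod.length →
    s.foldl (stepA prod) ((k : Int), n)
      = (((k + s.count '?' : Nat) : Int),
         10 ^ s.length * n + posVal (altDigits s (prod.drop k)).1) := by
  induction s with
  | nil => intro k n _; simp [posVal, altDigits]
  | cons c cs ih =>
    intro k n hle
    simp only [List.count_cons] at hle
    by_cases h : c = '?'
    · subst h
      have hk : k < prod.length := by simp at hle; omega
      have hget : PySem.List.pyGet? prod (k : Int) = some prod[k] := by
        simp [PySem.List.pyGet?_natCast, List.getElem?_eq_getElem hk]
      have hdrop : prod.drop k = prod[k] :: prod.drop (k + 1) :=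
        (List.drop_eq_getElem_cons hk)
      have hstep : stepA prod ((k : Int), n) '?'
          = (((k + 1 : Nat) : Int), 10 * n + prod[k]) := by
        simp [stepA, hget]; try (push_cast; ring)
      rw [List.foldl_cons, hstep, ih (k + 1) (10 * n + prod[k]) (by simp at hle; omega)]
      rw [hdrop]
      simp only [altDigits, List.headD_cons, List.tail_cons, if_true]
      rw [Prod.mk.injEq]
      refine ⟨by simp <;> omega, ?_⟩
      simp only [posVal, altDigits_length, List.length_cons]
      ring
    · have hstep : stepA prod ((k : Int), n) c
          = ((k : Int), 10 * n + ((c.toNat : Int) - 48)) := by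
        simp [stepA, h]
      rw [List.foldl_cons, hstep, ih k (10 * n + ((c.toNat : Int) - 48)) (by simp [h] at hle ⊢; omega)]
      simp only [altDigits, if_neg h]
      rw [Prod.mk.injEq]
      refine ⟨by simp [h] <;> omega, ?_⟩
      simp only [posVal, altDigits_length, List.length_cons]
      ring

-- ===== VERDICT (by name: the statement is the Claim_ definition above) =====
theorem replace_qmark_spec : Claim_equal_replace_qmark := by
  intro a b prod _ hpre
  obtain ⟨_, hcount⟩ := hpre
  unfold Spec_replace_qmark
  have ha := foldl_stepA prod a.toList 0 0 (by omega)
  have hb := foldl_stepA prod b.toList (a.toList.count '?') 0 (by omega)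
  simp only [Nat.cast_zero, Nat.zero_add, List.drop_zero] at ha
  show ((a.toList.foldl (stepA prod) (0, 0)).2,
        (b.toList.foldl (stepA prod) ((a.toList.foldl (stepA prod) (0, 0)).1, 0)).2)
      = (altNumber (altDigits a.toList prod).1,
         altNumber (altDigits b.toList (altDigits a.toList prod).2).1)
  rw [ha]
  simp only
  rw [hb]
  simp [altDigits_snd, altNumber_eq_posVal]
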